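-- pv_equiv track=rewrite | github.com/lucasle-sn/lexical-normalization | src/TwoGram.py | get_oov_distance
-- ===== SOURCE A (Python) =====
-- def get_oov_distance(rhs, lhs):
--     """
--     Measure distance between 2 strings
--     """
--
--     def create_twogram_array(string):
--         """
--         Create an array of two-character sequences of string
--         """
--         gram = [string[0]]
--         for i in range(len(string) - 1):
--             gram.append(string[i:i + 2])
--         gram.append(string[len(string) - 1])
--         return gram
--
--     rhs_gram = create_twogram_array(rhs)
--     lhs_gram = create_twogram_array(lhs)
--     similarity = 0
--
--     for i in range(len(rhs_gram)):
--         for j in range(len(lhs_gram)):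
--             if rhs_gram[i] == lhs_gram[j]:
--                 similarity = similarity + 1
--                 del lhs_gram[j] # Remove element at index j
--                 break
--
--     return len(rhs)+len(lhs) + 2 - 2*similarity
-- ===== SOURCE B (Python) =====
-- def get_oov_distance(rhs, lhs):
--     """
--     Measure distance between 2 strings
--     """
--
--     def grams(s):
--         # first char, all adjacent pairs, last char
--         return [s[0]] + [a + b for a, b in zip(s, s[1:])] + [s[-1]]
--
--     need = {}
--     for g in grams(lhs):
--         need[g] = need.get(g, 0) + 1
--
--     similarity = 0
--     for g in grams(rhs):
--         c = need.get(g, 0)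
--         if c > 0:
--             need[g] = c - 1
--             similarity += 1
--
--     return len(rhs) + len(lhs) + 2 - 2 * similarity
-- ===== Notes on version B (the rewrite author's own statement) =====
-- stated objective: faster
-- what changed: Replaces the nested scan with in-place deletion over the lhs gram list by a hash-map multiset counter built once over lhs grams and decremented in a single pass over rhs grams; gram arrays are built by zipping adjacent characters instead of index slicing.
import Mathlib
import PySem

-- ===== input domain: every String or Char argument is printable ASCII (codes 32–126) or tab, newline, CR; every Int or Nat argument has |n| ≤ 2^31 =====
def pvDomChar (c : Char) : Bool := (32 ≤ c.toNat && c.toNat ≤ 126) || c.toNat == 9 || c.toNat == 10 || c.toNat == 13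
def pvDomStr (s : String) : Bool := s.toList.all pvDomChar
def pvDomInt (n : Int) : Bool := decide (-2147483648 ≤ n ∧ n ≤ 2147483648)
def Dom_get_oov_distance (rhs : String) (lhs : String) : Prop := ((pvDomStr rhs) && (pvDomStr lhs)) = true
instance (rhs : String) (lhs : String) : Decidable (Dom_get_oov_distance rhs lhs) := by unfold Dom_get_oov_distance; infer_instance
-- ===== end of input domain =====

-- B replaces A's quadratic nested scan (delete-on-match over the lhs gram list) by a counter
-- dict built once over lhs two-grams and decremented in one pass over rhs two-grams (faster).


-- ===== PORT A =====
-- create_twogram_array: gram = [string[0]]; for i in range(len-1): gram.append(string[i:i+2]); gram.append(string[len-1])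
def gramsA (cs : List Char) : List (List Char) :=
  ((PySem.List.pyRange 0 ((cs.length : Int) - 1) 1).foldl
      (fun g i => g ++ [PySem.List.slice cs (some i) (some (i + 2))])
      [[PySem.List.pyGetD cs 0 ' ']])
    ++ [[PySem.List.pyGetD cs ((cs.length : Int) - 1) ' ']]

-- inner loop: for j in range(len(lhs_gram)): if rhs_gram[i] == lhs_gram[j]: del lhs_gram[j]; break
-- (scan left to right, delete the first match and stop; none = no match)
def scanDelA (g : List Char) : List (List Char) → Option (List (List Char))
  | [] => none
  | h :: t => if h = g then some t else (scanDelA g t).map (h :: ·)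

def get_oov_distance (rhs : String) (lhs : String) : Int :=
  let rhs_gram := gramsA rhs.toList
  let lhs_gram := gramsA lhs.toList
  let st := rhs_gram.foldl
      (fun (st : List (List Char) × Int) g =>
        match scanDelA g st.1 with
        | some l' => (l', st.2 + 1)
        | none => st) (lhs_gram, 0)
  (rhs.toList.length : Int) + (lhs.toList.length : Int) + 2 - 2 * st.2

-- ===== PORT B =====
-- grams(s) = [s[0]] + [a+b for a,b in zip(s, s[1:])] + [s[-1]]
def gramsB (cs : List Char) : List (List Char) :=
  [[PySem.List.pyGetD cs 0 ' ']]
    ++ (cs.zip (PySem.List.slice cs (some 1) none)).map (fun p => [p.1, p.2])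
    ++ [[PySem.List.pyGetD cs (-1) ' ']]

def get_oov_distance_alt (rhs : String) (lhs : String) : Int :=
  let need := (gramsB lhs.toList).foldl
      (fun (d : PySem.Dict (List Char) Int) g => d.insert g (d.getD g 0 + 1)) PySem.Dict.empty
  let st := (gramsB rhs.toList).foldl
      (fun (st : PySem.Dict (List Char) Int × Int) g =>
        let c := st.1.getD g 0
        if c > 0 then (st.1.insert g (c - 1), st.2 + 1) else st) (need, 0)
  (rhs.toList.length : Int) + (lhs.toList.length : Int) + 2 - 2 * st.2

-- ===== PRECONDITION & SPEC =====
-- A (and B) raise IndexError on an empty string (string[0]); Pre_ excludes exactly those inputs.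
def Pre_get_oov_distance (rhs : String) (lhs : String) : Prop := rhs ≠ "" ∧ lhs ≠ ""
instance (rhs : String) (lhs : String) : Decidable (Pre_get_oov_distance rhs lhs) := by unfold Pre_get_oov_distance; infer_instance
def pvWitness_get_oov_distance : String × String := ("night", "nacht")

def Spec_get_oov_distance (rhs : String) (lhs : String) (out : Int) : Prop := out = get_oov_distance_alt rhs lhs
instance (rhs : String) (lhs : String) (out : Int) : Decidable (Spec_get_oov_distance rhs lhs out) := by unfold Spec_get_oov_distance; infer_instance

-- ===== CLAIM (what is proved, stated in full; the proofs are below) =====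
def Claim_equal_get_oov_distance : Prop := ∀ (rhs : String) (lhs : String), Dom_get_oov_distance rhs lhs → Pre_get_oov_distance rhs lhs → Spec_get_oov_distance rhs lhs (get_oov_distance rhs lhs)

-- ===== LEMMAS AND PROOFS =====

-- the middle entries: index slices of length 2 are exactly the adjacent pairs
lemma slices_eq_zip : ∀ (cs : List Char),
    (List.range (cs.length - 1)).map (fun i => (cs.drop i).take 2)
      = (cs.zip cs.tail).map (fun p => [p.1, p.2]) := by
  intro cs
  induction cs with
  | nil => simp
  | cons c t ih =>
    cases t with
    | nil => simp
    | cons c2 t2 =>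
      simp only [List.length_cons, Nat.add_sub_cancel, List.range_succ_eq_map,
        List.map_cons, List.map_map, List.zip_cons_cons, List.tail_cons]
      congr 1

lemma gramsA_eq_gramsB (cs : List Char) (h : cs ≠ []) : gramsA cs = gramsB cs := by
  unfold gramsA gramsB
  have hlen : 1 ≤ cs.length := List.length_pos_of_ne_nil h
  congr 1
  · -- first entry ++ middle = first entry ++ zip-map
    rw [PySem.List.foldl_append_singleton_eq_map]
    congr 1
    have hmid : (PySem.List.pyRange 0 ((cs.length : Int) - 1) 1).map
        (fun i => PySem.List.slice cs (some i) (some (i + 2)))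
          = (List.range (cs.length - 1)).map (fun i => (cs.drop i).take 2) := by
      have hc : ((cs.length : Int) - 1) = ((cs.length - 1 : Nat) : Int) := by omega
      rw [hc, PySem.List.pyRange_zero_natCast, List.map_map]
      apply List.map_congr_left
      intro i _
      simp only [Function.comp]
      have : ((i : Int) + 2) = ((i + 2 : Nat) : Int) := by push_cast; ring
      rw [this, PySem.List.slice_natCast]
      congr 1
      omega
    rw [hmid, PySem.List.slice_from_one, slices_eq_zip]
  · -- last entry
    have h1 : PySem.List.pyGetD cs ((cs.length : Int) - 1) ' ' = cs.getLast h := by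
      have : ((cs.length : Int) - 1) = ((cs.length - 1 : Nat) : Int) := by omega
      rw [this, PySem.List.pyGetD_natCast]
      rw [List.getLast_eq_getElem]
      exact List.getD_eq_getElem cs ' ' (by omega)
    rw [h1, PySem.List.pyGetD_neg_one cs ' ' h]

-- A's inner scan finds the first match: it succeeds iff g ∈ L, and then removes the first occurrence
lemma scanDelA_eq (g : List Char) : ∀ (L : List (List Char)),
    scanDelA g L = if g ∈ L then some (L.erase g) else none := by
  intro L
  induction L with
  | nil => simp [scanDelA]
  | cons h t ih =>
    by_cases hg : h = g
    · subst hg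
      simp [scanDelA, List.erase_cons_head]
    · simp only [scanDelA, if_neg hg, ih, List.mem_cons]
      by_cases hmem : g ∈ t
      · simp [hmem, Ne.symm hg]
        rw [List.erase_cons_tail]
        simp [hg]
      · simp [hmem, Ne.symm hg]

-- the two similarity loops agree whenever the dict counts the remaining lhs grams
lemma loops_eq : ∀ (gs L : List (List Char)) (d : PySem.Dict (List Char) Int) (sim : Int),
    (∀ h, d.getD h 0 = (L.count h : Int)) →
    (gs.foldl (fun (st : List (List Char) × Int) g =>
        match scanDelA g st.1 with
        | some l' => (l', st.2 + 1)
        | none => st) (L, sim)).2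
      = (gs.foldl (fun (st : PySem.Dict (List Char) Int × Int) g =>
          let c := st.1.getD g 0
          if c > 0 then (st.1.insert g (c - 1), st.2 + 1) else st) (d, sim)).2 := by
  intro gs
  induction gs with
  | nil => intro L d sim _; rfl
  | cons g gs ih =>
    intro L d sim hinv
    simp only [List.foldl_cons]
    rw [scanDelA_eq]
    by_cases hmem : g ∈ L
    · have hpos : (0 : Int) < d.getD g 0 := by
        rw [hinv g]; exact_mod_cast List.count_pos_iff.mpr hmem
      simp only [if_pos hmem, if_pos hpos]
      apply ih
      intro h
      rw [PySem.Dict.getD_insert]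
      by_cases hh : h = g
      · subst hh
        rw [if_pos rfl, hinv h, List.count_erase_self]
        have : 1 ≤ L.count h := List.count_pos_iff.mpr hmem
        omega
      · rw [if_neg hh, hinv h, List.count_erase_of_ne]
        simpa using hh
    · have hz : ¬ (0 : Int) < d.getD g 0 := by
        rw [hinv g]
        simp [List.count_eq_zero_of_not_mem hmem]
      simp only [if_neg hmem, if_neg hz]
      exact ih L d sim hinv

-- ===== VERDICT (by name: the statement is the Claim_ definition above) =====
theorem get_oov_distance_spec : Claim_equal_get_oov_distance := by
  intro rhs lhs _ hpre
  obtain ⟨hr, hl⟩ := hpre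
  have hr' : rhs.toList ≠ [] := by simpa [String.toList_eq_nil_iff] using hr
  have hl' : lhs.toList ≠ [] := by simpa [String.toList_eq_nil_iff] using hl
  unfold Spec_get_oov_distance get_oov_distance get_oov_distance_alt
  simp only [gramsA_eq_gramsB rhs.toList hr', gramsA_eq_gramsB lhs.toList hl']
  congr 1
  congr 1
  apply loops_eq
  intro h
  rw [PySem.Dict.getD_foldl_insert_add_one]
  simp
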